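-- pv_equiv track=rewrite | github.com/Albertree/SOAR-ARC-test | procedural_memory/base_rules/_primitives.py | reverse_frame_colors
-- ===== SOURCE A (Python) =====
-- def reverse_frame_colors(grid):
--     """Detect concentric rectangular frames, reverse their color order.
--     Peels frames from outside in, collects colors, then reassigns reversed."""
--     h = len(grid)
--     w = len(grid[0]) if grid else 0
--     if h == 0 or w == 0:
--         return [row[:] for row in grid]
--
--     # Peel frames layer by layer
--     frames = []  # list of (set_of_positions, color)
--     remaining = set((r, c) for r in range(h) for c in range(w))
--     layer = 0
--     while remaining:
--         min_r = min(r for r, c in remaining)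
--         max_r = max(r for r, c in remaining)
--         min_c = min(c for r, c in remaining)
--         max_c = max(c for r, c in remaining)
--         border = set()
--         for r, c in remaining:
--             if r == min_r or r == max_r or c == min_c or c == max_c:
--                 border.add((r, c))
--         if not border:
--             break
--         # Get the color of this frame (should be uniform)
--         colors = set(grid[r][c] for r, c in border)
--         if len(colors) != 1:
--             break  # not uniform frame, bail
--         frames.append((border, colors.pop()))
--         remaining -= border
--         layer += 1
--
--     if not frames:
--         return [row[:] for row in grid]
--
--     # Reverse the color assignment
--     colors_reversed = [f[1] for f in reversed(frames)]
--     output = [row[:] for row in grid]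
--     for i, (positions, _) in enumerate(frames):
--         for r, c in positions:
--             output[r][c] = colors_reversed[i]
--     return output
-- ===== SOURCE B (Python) =====
-- def reverse_frame_colors(grid):
--     """One pass: each cell's frame index is min(r, h-1-r, c, w-1-c); frame l's
--     color is grid[l][l]; count the uniform outer frames, then rewrite with the
--     reversed colors.  Columns beyond the first row's width are copied untouched."""
--     h = len(grid)
--     w = len(grid[0]) if grid else 0
--     if h == 0 or w == 0:
--         return [row[:] for row in grid]
--     L = (min(h, w) + 1) // 2
--     colors = [grid[l][l] for l in range(L)]
--     uniform = [True] * L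
--     for r in range(h):
--         for c in range(w):
--             l = min(r, h - 1 - r, c, w - 1 - c)
--             if grid[r][c] != colors[l]:
--                 uniform[l] = False
--     k = 0
--     while k < L and uniform[k]:
--         k += 1
--     out = []
--     for r in range(h):
--         row = [colors[k - 1 - l] if (l := min(r, h - 1 - r, c, w - 1 - c)) < k
--                else grid[r][c] for c in range(w)]
--         out.append(row + grid[r][w:])
--     return out
-- ===== Notes on version B (the rewrite author's own statement) =====
-- stated objective: faster
-- what changed: Replaces the peel-one-frame-at-a-time loop over a shrinking set of positions (recomputing min/max bounds and the border each round) with a single pass that computes each cell's frame index in closed form as min(r, h-1-r, c, w-1-c), records each frame's colour and uniformity in one sweep, and rewrites the grid in one more pass.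
import Mathlib
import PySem

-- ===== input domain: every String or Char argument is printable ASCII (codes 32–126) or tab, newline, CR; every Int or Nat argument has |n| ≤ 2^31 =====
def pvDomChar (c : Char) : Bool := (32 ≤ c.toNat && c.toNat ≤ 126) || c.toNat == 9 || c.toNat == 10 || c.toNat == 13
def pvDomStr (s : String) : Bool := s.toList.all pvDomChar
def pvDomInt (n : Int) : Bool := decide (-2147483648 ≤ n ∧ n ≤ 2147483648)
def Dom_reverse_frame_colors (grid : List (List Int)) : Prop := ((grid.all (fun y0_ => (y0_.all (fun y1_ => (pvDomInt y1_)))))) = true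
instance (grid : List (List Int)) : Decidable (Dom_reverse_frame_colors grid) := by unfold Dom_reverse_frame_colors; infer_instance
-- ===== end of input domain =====

-- B replaces A's repeated frame-peeling over a shrinking position set by a single
-- pass using the closed-form frame index min(r, h-1-r, c, w-1-c); return values
-- agree on every rectangular-enough grid (Pre_), where neither program raises.

-- ===== PORT A =====
-- grid[r][c]; in range on every access A performs under Pre_ (default never read)
def pvCellA (grid : List (List Int)) (p : Nat × Nat) : Int :=
  (grid.getD p.1 []).getD p.2 0

-- min(f(q) for q in p :: rest)  (nonempty, order-independent)
def pvMinF (f : Nat × Nat → Nat) (p : Nat × Nat) (rest : List (Nat × Nat)) : Nat :=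
  rest.foldl (fun a q => min a (f q)) (f p)

def pvMaxF (f : Nat × Nat → Nat) (p : Nat × Nat) (rest : List (Nat × Nat)) : Nat :=
  rest.foldl (fun a q => max a (f q)) (f p)

-- the 'while remaining:' loop; fuel = h*w bounds the number of peeled frames
def pvLoopA (grid : List (List Int)) :
    Nat → List (Nat × Nat) → List (List (Nat × Nat) × Int) → List (List (Nat × Nat) × Int)
  | 0, _, frames => frames
  | _ + 1, [], frames => frames
  | fuel + 1, p :: rest, frames =>
    let remaining := p :: rest
    let minr := pvMinF Prod.fst p rest
    let maxr := pvMaxF Prod.fst p rest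
    let minc := pvMinF Prod.snd p rest
    let maxc := pvMaxF Prod.snd p rest
    let border := remaining.filter
      (fun q => q.1 == minr || q.1 == maxr || q.2 == minc || q.2 == maxc)
    if border.isEmpty then frames
    else
      let colors : PySem.Set Int := PySem.Set.ofList (border.map (pvCellA grid))
      if colors.length ≠ 1 then frames
      else pvLoopA grid fuel (remaining.filter (fun q => !(border.contains q)))
             (frames ++ [(border, colors.headD 0)])

-- output[r][c] = v  (both indices in range under Pre_; List.set is exact there)
def pvAssign (v : Int) (out : List (List Int)) (p : Nat × Nat) : List (List Int) :=
  out.set p.1 ((out.getD p.1 []).set p.2 v)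

def reverse_frame_colors (grid : List (List Int)) : List (List Int) :=
  let h := grid.length
  let w := (grid.headD []).length
  if h = 0 ∨ w = 0 then grid.map (fun row => row)
  else
    let remaining := (List.range h).flatMap (fun r => (List.range w).map (fun c => (r, c)))
    let frames := pvLoopA grid (h * w) remaining []
    if frames.isEmpty then grid.map (fun row => row)
    else
      let colorsRev := (frames.reverse.map (fun f => f.2))
      (PySem.List.enumerate frames 0).foldl
        (fun out fi =>
          fi.2.1.foldl (pvAssign (PySem.List.pyGetD colorsRev fi.1 0)) out)
        (grid.map (fun row => row))

-- ===== PORT B =====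
-- frame index of cell (r,c)
def layB (h w r c : Nat) : Nat := min (min r (h - 1 - r)) (min c (w - 1 - c))

-- the 'while k < L and uniform[k]: k += 1' counter
def pvPrefTrue : List Bool → Nat
  | [] => 0
  | b :: rest => if b then pvPrefTrue rest + 1 else 0

def reverse_frame_colors_alt (grid : List (List Int)) : List (List Int) :=
  let h := grid.length
  let w := (grid.headD []).length
  if h = 0 ∨ w = 0 then grid.map (fun row => row)
  else
    let L := (min h w + 1) / 2
    let colors := (List.range L).map (fun l => (grid.getD l []).getD l 0)
    let uniform := (List.range h).foldl (fun u r =>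
        (List.range w).foldl (fun u c =>
          if (grid.getD r []).getD c 0 ≠ colors.getD (layB h w r c) 0
          then u.set (layB h w r c) false else u) u)
      (List.replicate L true)
    let k := pvPrefTrue uniform
    (List.range h).map (fun r =>
      ((List.range w).map (fun c =>
        if layB h w r c < k then colors.getD (k - 1 - layB h w r c) 0
        else (grid.getD r []).getD c 0))
      ++ (grid.getD r []).drop w)   -- grid[r][w:] (slice from a natural index = drop)

-- ===== PRECONDITION & SPEC =====
-- Pre_ excludes exactly the grids on which A raises IndexError: a nonempty grid
-- with a nonempty first row but some row shorter than the first (A indexes every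
-- row at the first row's width while peeling the outermost frame).
def Pre_reverse_frame_colors (grid : List (List Int)) : Prop :=
  ∀ row ∈ grid, (grid.headD []).length ≤ row.length
instance (grid : List (List Int)) : Decidable (Pre_reverse_frame_colors grid) := by
  unfold Pre_reverse_frame_colors; infer_instance

def pvWitness_reverse_frame_colors : List (List Int) :=
  [[1, 1, 1], [1, 2, 1], [1, 1, 1]]

def Spec_reverse_frame_colors (grid : List (List Int)) (out : List (List Int)) : Prop := out = reverse_frame_colors_alt grid
instance (grid : List (List Int)) (out : List (List Int)) : Decidable (Spec_reverse_frame_colors grid out) := by unfold Spec_reverse_frame_colors; infer_instance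

-- ===== CLAIM (what is proved, stated in full; the proofs are below) =====
def Claim_equal_reverse_frame_colors : Prop := ∀ (grid : List (List Int)), Dom_reverse_frame_colors grid → Pre_reverse_frame_colors grid → Spec_reverse_frame_colors grid (reverse_frame_colors grid)

-- ===== LEMMAS AND PROOFS =====

-- ---------- proof-side definitions ----------

-- all positions (r,c), r<h, c<w, row-major (the insertion order of A's 'remaining' set)
def pvAll (h w : Nat) : List (Nat × Nat) :=
  (List.range h).flatMap (fun r => (List.range w).map (fun c => (r, c)))

-- cells still unpeeled after t rounds
def pvRem (h w t : Nat) : List (Nat × Nat) :=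
  (pvAll h w).filter (fun p => t ≤ layB h w p.1 p.2)

-- the t-th frame
def pvFrame (h w t : Nat) : List (Nat × Nat) :=
  (pvAll h w).filter (fun p => layB h w p.1 p.2 == t)

-- number of frames
def pvL (h w : Nat) : Nat := (min h w + 1) / 2

-- is frame t uniformly coloured?
def pvUb (grid : List (List Int)) (t : Nat) : Bool :=
  (pvFrame grid.length (grid.headD []).length t).all
    (fun p => pvCellA grid p == pvCellA grid (t, t))

-- number of uniform outer frames
def pvK (grid : List (List Int)) : Nat :=
  pvPrefTrue ((List.range (pvL grid.length (grid.headD []).length)).map (pvUb grid))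

-- the frames A's loop collects, starting at layer t with n layers to go
def pvFm (grid : List (List Int)) : Nat → Nat → List (List (Nat × Nat) × Int)
  | 0, _ => []
  | n + 1, t =>
    if pvUb grid t then
      (pvFrame grid.length (grid.headD []).length t, pvCellA grid (t, t)) :: pvFm grid n (t + 1)
    else []

-- the common closed-form result
def pvModel (grid : List (List Int)) : List (List Int) :=
  let h := grid.length
  let w := (grid.headD []).length
  let K := pvK grid
  (List.range h).map (fun r =>
    ((List.range w).map (fun c =>
      if layB h w r c < K then pvCellA grid (K - 1 - layB h w r c, K - 1 - layB h w r c)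
      else pvCellA grid (r, c)))
    ++ (grid.getD r []).drop w)

-- ---------- basic combinatorics ----------

lemma mem_pvAll {h w : Nat} {p : Nat × Nat} : p ∈ pvAll h w ↔ p.1 < h ∧ p.2 < w := by
  obtain ⟨a, b⟩ := p
  simp [pvAll]


lemma lay_lt_L {h w r c : Nat} (hr : r < h) (hc : c < w) : layB h w r c < pvL h w := by
  simp only [layB, pvL]; omega


lemma lay_self {h w t : Nat} (ht : t < pvL h w) : layB h w t t = t := by
  simp only [layB, pvL] at *; omega


lemma mem_pvFrame {h w t : Nat} {p : Nat × Nat} :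
    p ∈ pvFrame h w t ↔ p.1 < h ∧ p.2 < w ∧ layB h w p.1 p.2 = t := by
  simp [pvFrame, List.mem_filter, mem_pvAll, and_assoc]


lemma self_mem_pvFrame {h w t : Nat} (ht : t < pvL h w) : (t, t) ∈ pvFrame h w t := by
  have h1 : pvL h w ≤ h := by simp only [pvL]; omega
  have h2 : pvL h w ≤ w := by simp only [pvL]; omega
  exact mem_pvFrame.2 ⟨by omega, by omega, lay_self ht⟩


lemma mem_pvRem {h w t : Nat} {p : Nat × Nat} :
    p ∈ pvRem h w t ↔ p.1 < h ∧ p.2 < w ∧ t ≤ layB h w p.1 p.2 := by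
  simp [pvRem, List.mem_filter, mem_pvAll, and_assoc]


lemma pvRem_zero {h w : Nat} : pvRem h w 0 = pvAll h w := by
  simp [pvRem]


lemma pvRem_L {h w : Nat} : pvRem h w (pvL h w) = [] := by
  simp only [pvRem, List.filter_eq_nil_iff]
  intro p hp
  have := mem_pvAll.1 hp
  have := lay_lt_L this.1 this.2
  simp; omega


lemma pvRem_ne_nil {h w t : Nat} (ht : t < pvL h w) : pvRem h w t ≠ [] := by
  have h1 : pvL h w ≤ h := by simp only [pvL]; omega
  have h2 : pvL h w ≤ w := by simp only [pvL]; omega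
  have : (t, t) ∈ pvRem h w t :=
    mem_pvRem.2 ⟨by omega, by omega, le_of_eq (lay_self ht).symm⟩
  exact List.ne_nil_of_mem this


-- ---------- min/max folds ----------

lemma rem_bounds {h w t : Nat} {q : Nat × Nat} (hq : q ∈ pvRem h w t) :
    t ≤ q.1 ∧ q.1 ≤ h - 1 - t ∧ t ≤ q.2 ∧ q.2 ≤ w - 1 - t := by
  obtain ⟨h1, h2, h3⟩ := mem_pvRem.1 hq
  simp only [layB] at h3; omega

lemma corner_r_mem {h w t : Nat} (ht : t < pvL h w) : (h - 1 - t, t) ∈ pvRem h w t := by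
  have := ht; simp only [pvL] at this
  refine mem_pvRem.2 ⟨by omega, by omega, ?_⟩
  simp only [layB]; omega

lemma corner_c_mem {h w t : Nat} (ht : t < pvL h w) : (t, w - 1 - t) ∈ pvRem h w t := by
  have := ht; simp only [pvL] at this
  refine mem_pvRem.2 ⟨by omega, by omega, ?_⟩
  simp only [layB]; omega

lemma diag_mem_rem {h w t : Nat} (ht : t < pvL h w) : (t, t) ∈ pvRem h w t := by
  have := ht; simp only [pvL] at this
  exact mem_pvRem.2 ⟨by omega, by omega, le_of_eq (lay_self ht).symm⟩


lemma foldl_min_eq {l : List Nat} {a t : Nat} (ha : t ≤ a)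
    (hall : ∀ x ∈ l, t ≤ x) (hmem : a = t ∨ t ∈ l) : l.foldl min a = t := by
  induction l generalizing a with
  | nil => simpa using hmem.resolve_right (by simp)
  | cons x l ih =>
    simp only [List.foldl_cons]
    have hx : t ≤ x := hall x (by simp)
    refine ih (by omega) (fun y hy => hall y (by simp [hy])) ?_
    rcases hmem with h | h
    · left; omega
    · rcases List.mem_cons.1 h with h | h
      · left; omega
      · right; exact h


lemma foldl_max_eq {l : List Nat} {a t : Nat} (ha : a ≤ t)
    (hall : ∀ x ∈ l, x ≤ t) (hmem : a = t ∨ t ∈ l) : l.foldl max a = t := by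
  induction l generalizing a with
  | nil => simpa using hmem.resolve_right (by simp)
  | cons x l ih =>
    simp only [List.foldl_cons]
    have hx : x ≤ t := hall x (by simp)
    refine ih (by omega) (fun y hy => hall y (by simp [hy])) ?_
    rcases hmem with h | h
    · left; omega
    · rcases List.mem_cons.1 h with h | h
      · left; omega
      · right; exact h


lemma pvMinF_fst {h w t : Nat} {p : Nat × Nat} {rest : List (Nat × Nat)}
    (ht : t < pvL h w) (hrem : pvRem h w t = p :: rest) : pvMinF Prod.fst p rest = t := by
  have hmemP : ∀ q ∈ p :: rest, q ∈ pvRem h w t := fun q hq => hrem ▸ hq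
  have htt : (t, t) ∈ p :: rest := hrem ▸ diag_mem_rem ht
  rw [pvMinF, ← List.foldl_map]
  refine foldl_min_eq ((rem_bounds (hmemP p (by simp))).1) ?_ ?_
  · intro x hx
    obtain ⟨q, hq, rfl⟩ := List.mem_map.1 hx
    exact (rem_bounds (hmemP q (by simp [hq]))).1
  · rcases List.mem_cons.1 htt with h | h
    · left; rw [← h]
    · right; exact List.mem_map.2 ⟨(t, t), h, rfl⟩


lemma pvMaxF_fst {h w t : Nat} {p : Nat × Nat} {rest : List (Nat × Nat)}
    (ht : t < pvL h w) (hrem : pvRem h w t = p :: rest) : pvMaxF Prod.fst p rest = h - 1 - t := by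
  have hmemP : ∀ q ∈ p :: rest, q ∈ pvRem h w t := fun q hq => hrem ▸ hq
  have htt : (h - 1 - t, t) ∈ p :: rest := hrem ▸ corner_r_mem ht
  rw [pvMaxF, ← List.foldl_map]
  refine foldl_max_eq ((rem_bounds (hmemP p (by simp))).2.1) ?_ ?_
  · intro x hx
    obtain ⟨q, hq, rfl⟩ := List.mem_map.1 hx
    exact (rem_bounds (hmemP q (by simp [hq]))).2.1
  · rcases List.mem_cons.1 htt with hm | hm
    · left; rw [← hm]
    · right; exact List.mem_map.2 ⟨(h - 1 - t, t), hm, rfl⟩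


lemma pvMinF_snd {h w t : Nat} {p : Nat × Nat} {rest : List (Nat × Nat)}
    (ht : t < pvL h w) (hrem : pvRem h w t = p :: rest) : pvMinF Prod.snd p rest = t := by
  have hmemP : ∀ q ∈ p :: rest, q ∈ pvRem h w t := fun q hq => hrem ▸ hq
  have htt : (t, t) ∈ p :: rest := hrem ▸ diag_mem_rem ht
  rw [pvMinF, ← List.foldl_map]
  refine foldl_min_eq ((rem_bounds (hmemP p (by simp))).2.2.1) ?_ ?_
  · intro x hx
    obtain ⟨q, hq, rfl⟩ := List.mem_map.1 hx
    exact (rem_bounds (hmemP q (by simp [hq]))).2.2.1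
  · rcases List.mem_cons.1 htt with h | h
    · left; rw [← h]
    · right; exact List.mem_map.2 ⟨(t, t), h, rfl⟩


lemma pvMaxF_snd {h w t : Nat} {p : Nat × Nat} {rest : List (Nat × Nat)}
    (ht : t < pvL h w) (hrem : pvRem h w t = p :: rest) : pvMaxF Prod.snd p rest = w - 1 - t := by
  have hmemP : ∀ q ∈ p :: rest, q ∈ pvRem h w t := fun q hq => hrem ▸ hq
  have htt : (t, w - 1 - t) ∈ p :: rest := hrem ▸ corner_c_mem ht
  rw [pvMaxF, ← List.foldl_map]
  refine foldl_max_eq ((rem_bounds (hmemP p (by simp))).2.2.2) ?_ ?_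
  · intro x hx
    obtain ⟨q, hq, rfl⟩ := List.mem_map.1 hx
    exact (rem_bounds (hmemP q (by simp [hq]))).2.2.2
  · rcases List.mem_cons.1 htt with h | h
    · left; rw [← h]
    · right; exact List.mem_map.2 ⟨(t, w - 1 - t), h, rfl⟩


-- ---------- one round of the loop ----------

lemma border_eq {h w t : Nat} (ht : t < pvL h w) :
    (pvRem h w t).filter
      (fun q => q.1 == t || q.1 == h - 1 - t || q.2 == t || q.2 == w - 1 - t)
    = pvFrame h w t := by
  rw [pvRem, List.filter_filter, pvFrame]
  refine List.filter_congr ?_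
  intro p hp
  obtain ⟨ha, hb⟩ := mem_pvAll.1 hp
  have ht' := ht
  simp only [pvL] at ht'
  rw [Bool.eq_iff_iff]
  simp only [Bool.and_eq_true, Bool.or_eq_true, beq_iff_eq, decide_eq_true_eq, layB]
  omega


lemma next_rem {h w t : Nat} :
    (pvRem h w t).filter (fun q => !((pvFrame h w t).contains q)) = pvRem h w (t + 1) := by
  rw [pvRem, List.filter_filter, pvRem]
  refine List.filter_congr ?_
  intro p hp
  obtain ⟨ha, hb⟩ := mem_pvAll.1 hp
  rw [Bool.eq_iff_iff]
  simp only [Bool.and_eq_true, Bool.not_eq_eq_eq_not, Bool.not_true, decide_eq_true_eq,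
    ← Bool.not_eq_true, List.contains_iff_mem, mem_pvFrame]
  constructor
  · rintro ⟨hnm, hle⟩
    rcases Nat.lt_or_ge t (layB h w p.1 p.2) with hlt | hge
    · omega
    · exact absurd ⟨ha, hb, by omega⟩ hnm
  · intro hlt
    exact ⟨fun hmem => by omega, by omega⟩


lemma ofList_all_eq {l : List Int} {v : Int} (hne : l ≠ []) (hall : ∀ x ∈ l, x = v) :
    PySem.Set.ofList l = [v] := by
  rcases l with _ | ⟨x, rest⟩
  · exact absurd rfl hne
  · have hx := hall x (by simp)
    have hrest : ∀ y ∈ rest, y = v := fun y hy => hall y (by simp [hy])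
    rw [PySem.Set.ofList_eq_foldl]
    simp only [List.foldl_cons, hx]
    have h0 : PySem.Set.add ([] : List Int) v = [v] := by simp [PySem.Set.add]
    rw [h0]
    clear hall hne
    induction rest with
    | nil => rfl
    | cons y ys ih =>
      have hy := hrest y (by simp)
      simp only [List.foldl_cons, hy]
      have h1 : PySem.Set.add [v] v = [v] := by simp [PySem.Set.add]
      rw [h1]
      exact ih (fun z hz => hrest z (by simp [hz]))


-- ---------- the loop computes pvFm ----------

lemma loop_eq (grid : List (List Int)) :
    ∀ n t fuel frames, pvL grid.length (grid.headD []).length = t + n → n ≤ fuel →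
      pvLoopA grid fuel (pvRem grid.length (grid.headD []).length t) frames
        = frames ++ pvFm grid n t := by
  intro n
  induction n with
  | zero =>
    intro t fuel frames hL _
    have hrem : pvRem grid.length (grid.headD []).length t = [] := by
      have ht : t = pvL grid.length (grid.headD []).length := by omega
      rw [ht, pvRem_L]
    rw [hrem]
    cases fuel <;> simp [pvLoopA, pvFm]
  | succ n ih =>
    intro t fuel frames hL hfuel
    have ht : t < pvL grid.length (grid.headD []).length := by omega
    obtain ⟨f, rfl⟩ : ∃ f, fuel = f + 1 := ⟨fuel - 1, by omega⟩
    obtain ⟨p, rest, hrem⟩ : ∃ p rest,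
        pvRem grid.length (grid.headD []).length t = p :: rest := by
      rcases hcase : pvRem grid.length (grid.headD []).length t with _ | ⟨p, rest⟩
      · exact absurd hcase (pvRem_ne_nil ht)
      · exact ⟨p, rest, rfl⟩
    rw [hrem]
    simp only [pvLoopA]
    rw [pvMinF_fst ht hrem, pvMaxF_fst ht hrem, pvMinF_snd ht hrem, pvMaxF_snd ht hrem]
    have hb : (p :: rest).filter
        (fun q => q.1 == t || q.1 == grid.length - 1 - t || q.2 == t ||
          q.2 == (grid.headD []).length - 1 - t)
        = pvFrame grid.length (grid.headD []).length t := by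
      rw [← hrem]; exact border_eq ht
    rw [hb]
    have hfne : pvFrame grid.length (grid.headD []).length t ≠ [] :=
      List.ne_nil_of_mem (self_mem_pvFrame ht)
    rw [if_neg (fun hh => hfne (List.isEmpty_iff.1 hh))]
    have hnext : (p :: rest).filter
        (fun q => !((pvFrame grid.length (grid.headD []).length t).contains q))
        = pvRem grid.length (grid.headD []).length (t + 1) := by
      rw [← hrem]; exact next_rem
    rcases hU : pvUb grid t with _ | _
    · -- non-uniform layer: at least two colours, the loop stops
      rw [pvUb, List.all_eq_false] at hU
      obtain ⟨p0, hp0mem, hp0ne⟩ := hU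
      have hp0 : pvCellA grid p0 ≠ pvCellA grid (t, t) := by simpa using hp0ne
      have h1 : pvCellA grid (t, t) ∈ PySem.Set.ofList
          ((pvFrame grid.length (grid.headD []).length t).map (pvCellA grid)) :=
        (PySem.Set.mem_ofList _ _).2 (List.mem_map.2 ⟨(t, t), self_mem_pvFrame ht, rfl⟩)
      have h2 : pvCellA grid p0 ∈ PySem.Set.ofList
          ((pvFrame grid.length (grid.headD []).length t).map (pvCellA grid)) :=
        (PySem.Set.mem_ofList _ _).2 (List.mem_map.2 ⟨p0, hp0mem, rfl⟩)
      have hlen : (PySem.Set.ofList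
          ((pvFrame grid.length (grid.headD []).length t).map (pvCellA grid))).length ≠ 1 := by
        intro hlen
        obtain ⟨c0, hc⟩ := List.length_eq_one_iff.1 hlen
        rw [hc] at h1 h2
        simp only [List.mem_singleton] at h1 h2
        exact absurd (h2.trans h1.symm) hp0
      rw [if_pos hlen]
      have hUb : pvUb grid t = false := by
        rw [pvUb, List.all_eq_false]
        exact ⟨p0, hp0mem, by simpa using hp0⟩
      simp only [pvFm, hUb, if_false, Bool.false_eq_true, List.append_nil]
    · -- uniform layer: one colour, the loop peels it and goes on
      have hcolors : PySem.Set.ofList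
          ((pvFrame grid.length (grid.headD []).length t).map (pvCellA grid))
          = [pvCellA grid (t, t)] := by
        refine ofList_all_eq (by simpa using hfne) ?_
        intro x hx
        obtain ⟨q, hq, rfl⟩ := List.mem_map.1 hx
        rw [pvUb, List.all_eq_true] at hU
        simpa using hU q hq
      rw [hcolors, if_neg (by simp)]
      rw [hnext]
      rw [show ([pvCellA grid (t, t)].headD 0) = pvCellA grid (t, t) from rfl]
      rw [ih (t + 1) f (frames ++ [(pvFrame grid.length (grid.headD []).length t,
            pvCellA grid (t, t))]) (by omega) (by omega)]
      simp [pvFm, hU]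


-- ---------- pvPrefTrue / pvK ----------

lemma pvPrefTrue_le_length (l : List Bool) : pvPrefTrue l ≤ l.length := by
  induction l with
  | nil => simp [pvPrefTrue]
  | cons b rest ih =>
    simp only [pvPrefTrue]
    cases b <;> simp <;> omega


lemma pvPrefTrue_getD_true {l : List Bool} {i : Nat} (hi : i < pvPrefTrue l) :
    l.getD i false = true := by
  induction l generalizing i with
  | nil => simp [pvPrefTrue] at hi
  | cons b rest ih =>
    cases b with
    | false => simp [pvPrefTrue] at hi
    | true =>
      cases i with
      | zero => rfl
      | succ j =>
        simp only [pvPrefTrue, if_true] at hi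
        simpa using ih (by omega)


lemma pvPrefTrue_getD_false {l : List Bool} (hl : pvPrefTrue l < l.length) :
    l.getD (pvPrefTrue l) false = false := by
  induction l with
  | nil => simp [pvPrefTrue] at hl
  | cons b rest ih =>
    cases b with
    | false => rfl
    | true =>
      simp only [pvPrefTrue, if_true] at hl ⊢
      simpa using ih (by simpa using hl)


lemma pvK_le_L (grid : List (List Int)) : pvK grid ≤ pvL grid.length (grid.headD []).length := by
  calc pvK grid ≤ ((List.range (pvL grid.length (grid.headD []).length)).map (pvUb grid)).length :=
        pvPrefTrue_le_length _
    _ = pvL grid.length (grid.headD []).length := by rw [List.length_map, List.length_range]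


lemma pvUb_of_lt_K {grid : List (List Int)} {t : Nat} (ht : t < pvK grid) : pvUb grid t = true := by
  have hK := pvK_le_L grid
  have hgd := pvPrefTrue_getD_true (l := (List.range (pvL grid.length (grid.headD []).length)).map (pvUb grid)) (i := t) ht
  rwa [List.getD_eq_getElem _ _ (by rw [List.length_map, List.length_range]; omega), List.getElem_map, List.getElem_range] at hgd


lemma le_pvK {grid : List (List Int)} {t : Nat}
    (ht : t ≤ pvL grid.length (grid.headD []).length)
    (hall : ∀ s < t, pvUb grid s = true) : t ≤ pvK grid := by
  by_contra hcon
  push_neg at hcon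
  have hlen : pvK grid < ((List.range (pvL grid.length (grid.headD []).length)).map (pvUb grid)).length := by
    rw [List.length_map, List.length_range]; omega
  have hgd : ((List.range (pvL grid.length (grid.headD []).length)).map (pvUb grid)).getD
      (pvK grid) false = false :=
    pvPrefTrue_getD_false (l := (List.range (pvL grid.length (grid.headD []).length)).map (pvUb grid)) hlen
  rw [List.getD_eq_getElem _ _ hlen, List.getElem_map, List.getElem_range] at hgd
  have := hall (pvK grid) (by omega)
  rw [this] at hgd
  exact absurd hgd (by simp)


lemma pvK_le_of_not_Ub {grid : List (List Int)} {t : Nat} (h : pvUb grid t = false) :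
    pvK grid ≤ t := by
  by_contra hcon
  push_neg at hcon
  have := pvUb_of_lt_K hcon
  rw [h] at this
  exact absurd this (by simp)


lemma pvFm_eq_map (grid : List (List Int)) :
    ∀ n t, pvL grid.length (grid.headD []).length = t + n → (∀ s < t, pvUb grid s = true) →
      pvFm grid n t = (List.range (pvK grid - t)).map
        (fun j => (pvFrame grid.length (grid.headD []).length (t + j),
                   pvCellA grid (t + j, t + j))) := by
  intro n
  induction n with
  | zero =>
    intro t hL hall
    have h1 : t ≤ pvK grid := le_pvK (by omega) hall
    have h2 : pvK grid ≤ t := by have := pvK_le_L grid; omega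
    have : pvK grid - t = 0 := by omega
    simp [pvFm, this]
  | succ n ih =>
    intro t hL hall
    rcases hU : pvUb grid t with _ | _
    · have h1 : t ≤ pvK grid := le_pvK (by omega) hall
      have h2 : pvK grid ≤ t := pvK_le_of_not_Ub hU
      have h0 : pvK grid - t = 0 := by omega
      simp [pvFm, hU, h0]
    · have h1 : t + 1 ≤ pvK grid := by
        refine le_pvK (by omega) ?_
        intro s hs
        rcases Nat.lt_or_ge s t with hlt | hge
        · exact hall s hlt
        · have : s = t := by omega
          rw [this]; exact hU
      have hrec := ih (t + 1) (by omega) (fun s hs => by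
        rcases Nat.lt_or_ge s t with hlt | hge
        · exact hall s hlt
        · have : s = t := by omega
          rw [this]; exact hU)
      simp only [pvFm, hU, if_true]
      rw [hrec]
      have hKt : pvK grid - t = (pvK grid - (t + 1)) + 1 := by omega
      rw [hKt, List.range_succ_eq_map]
      simp only [List.map_cons, List.map_map, Nat.add_zero]
      congr 1
      refine List.map_congr_left ?_
      intro j _
      simp only [Function.comp]
      have e : t + Nat.succ j = t + 1 + j := by omega
      rw [e]


-- ---------- the assignment fold ----------

lemma getD_set {α : Type} (l : List α) (n : Nat) (a : α) (m : Nat) (d : α) :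
    (l.set n a).getD m d = if m = n ∧ n < l.length then a else l.getD m d := by
  rcases Nat.lt_or_ge m l.length with hm | hm
  · by_cases h1 : m = n
    · subst h1
      by_cases h2 : m < l.length
      · rw [List.getD_eq_getElem _ _ (by rw [List.length_set]; omega),
            List.getElem_set, if_pos rfl, if_pos ⟨rfl, h2⟩]
      · omega
    · rw [List.getD_eq_getElem _ _ (by rw [List.length_set]; omega),
          List.getElem_set, if_neg (fun h => h1 h.symm),
          if_neg (fun h => h1 h.1), List.getD_eq_getElem _ _ hm]
  · rw [List.getD_eq_default _ _ (by rw [List.length_set]; omega)]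
    split_ifs with h
    · omega
    · rw [List.getD_eq_default _ _ hm]

lemma assign_length (v : Int) (ps : List (Nat × Nat)) (out : List (List Int)) :
    (ps.foldl (pvAssign v) out).length = out.length := by
  induction ps generalizing out with
  | nil => rfl
  | cons q ps ih =>
    simp only [List.foldl_cons]
    rw [ih]
    simp [pvAssign]


lemma assign_row_length (v : Int) (ps : List (Nat × Nat)) (out : List (List Int)) (r : Nat) :
    ((ps.foldl (pvAssign v) out).getD r []).length = (out.getD r []).length := by
  induction ps generalizing out with
  | nil => rfl
  | cons q ps ih =>
    simp only [List.foldl_cons]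
    rw [ih]
    simp only [pvAssign]
    rw [getD_set]
    split_ifs with hcase
    · rw [List.length_set, hcase.1]
    · rfl


lemma assign_entry (v : Int) (ps : List (Nat × Nat)) (out : List (List Int)) (r c : Nat)
    (hin : ∀ p ∈ ps, p.1 < out.length ∧ p.2 < (out.getD p.1 []).length) :
    ((ps.foldl (pvAssign v) out).getD r []).getD c 0
      = if (r, c) ∈ ps then v else (out.getD r []).getD c 0 := by
  induction ps generalizing out with
  | nil => simp
  | cons q ps ih =>
    simp only [List.foldl_cons]
    have hq := hin q (by simp)
    have hlen1 : (pvAssign v out q).length = out.length := by simp [pvAssign]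
    have hrow1 : ∀ r', ((pvAssign v out q).getD r' []).length = (out.getD r' []).length := by
      intro r'
      simp only [pvAssign]
      rw [getD_set]
      split_ifs with hcase
      · rw [List.length_set, hcase.1]
      · rfl
    have hin' : ∀ p ∈ ps, p.1 < (pvAssign v out q).length ∧
        p.2 < ((pvAssign v out q).getD p.1 []).length := by
      intro p hp
      have := hin p (by simp [hp])
      rw [hlen1, hrow1]
      exact this
    rw [ih (pvAssign v out q) hin']
    obtain ⟨q1, q2⟩ := q
    simp only at hq
    by_cases hmem : (r, c) ∈ ps
    · simp [hmem]
    · simp only [List.mem_cons, hmem, or_false]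
      simp only [pvAssign, getD_set]
      by_cases h2 : r = q1 <;> by_cases h3 : c = q2 <;>
        simp [h2, h3, hq.1, hq.2, Prod.ext_iff, List.getElem?_set] <;>
        simp_all [List.getElem?_set, eq_comm]

-- ---------- enumerate over the frame list ----------

lemma colorsRev_getD (grid : List (List Int)) (i : Nat) (hi : i < pvK grid) :
    (((List.range (pvK grid)).map (fun t => pvCellA grid (t, t))).reverse).getD i 0
      = pvCellA grid (pvK grid - 1 - i, pvK grid - 1 - i) := by
  have hlen : i < (((List.range (pvK grid)).map (fun t => pvCellA grid (t, t))).reverse).length := by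
    rw [List.length_reverse, List.length_map, List.length_range]; exact hi
  rw [List.getD_eq_getElem _ _ hlen, List.getElem_reverse]
  rw [List.getElem_map, List.getElem_range]
  congr 1 <;> · rw [List.length_map, List.length_range]


-- ---------- A equals the model ----------

lemma row_reconstruct (row : List Int) (w : Nat) (hw : w ≤ row.length) :
    (List.range w).map (fun c => row.getD c 0) ++ row.drop w = row := by
  have h1 : (List.range w).map (fun c => row.getD c 0) = row.take w := by
    apply List.ext_getElem
    · rw [List.length_map, List.length_range, List.length_take]; omega
    · intro i hi1 hi2
      rw [List.getElem_map, List.getElem_range, List.getElem_take,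
        List.getD_eq_getElem _ _ (by rw [List.length_map, List.length_range] at hi1; omega)]
  rw [h1, List.take_append_drop]


lemma enumerate_append {α : Type} :
    ∀ (l1 l2 : List α) (s : Int), PySem.List.enumerate (l1 ++ l2) s
      = PySem.List.enumerate l1 s ++ PySem.List.enumerate l2 (s + l1.length) := by
  intro l1
  induction l1 with
  | nil => intro l2 s; simp [PySem.List.enumerate_nil]
  | cons x xs ih =>
    intro l2 s
    simp only [List.cons_append, PySem.List.enumerate_cons, ih, List.length_cons]
    congr 2
    push_cast
    ring

-- the partial output after assigning the first m reversed frames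
def pvOutM (grid : List (List Int)) (m : Nat) : List (List Int) :=
  (PySem.List.enumerate ((List.range m).map
      (fun t => (pvFrame grid.length (grid.headD []).length t, pvCellA grid (t, t)))) 0).foldl
    (fun out fi => fi.2.1.foldl
      (pvAssign (PySem.List.pyGetD
        (((List.range (pvK grid)).map (fun t => pvCellA grid (t, t))).reverse) fi.1 0)) out)
    (grid.map (fun row => row))

lemma pvOutM_zero (grid : List (List Int)) : pvOutM grid 0 = grid.map (fun row => row) := rfl

lemma pvOutM_succ (grid : List (List Int)) (m : Nat) (hm : m < pvK grid) :
    pvOutM grid (m + 1) = (pvFrame grid.length (grid.headD []).length m).foldl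
      (pvAssign (pvCellA grid (pvK grid - 1 - m, pvK grid - 1 - m))) (pvOutM grid m) := by
  unfold pvOutM
  rw [List.range_succ, List.map_append, enumerate_append, List.foldl_append]
  simp only [List.map_cons, List.map_nil, PySem.List.enumerate_cons, PySem.List.enumerate_nil,
    List.foldl_cons, List.foldl_nil, List.length_map, List.length_range, zero_add]
  rw [PySem.List.pyGetD_natCast, colorsRev_getD grid m hm]

lemma pvOutM_inv (grid : List (List Int)) (hpre : Pre_reverse_frame_colors grid) :
    ∀ m, m ≤ pvK grid →
      (pvOutM grid m).length = grid.length ∧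
      (∀ r, ((pvOutM grid m).getD r []).length = (grid.getD r []).length) ∧
      (∀ r c, r < grid.length → c < (grid.getD r []).length →
        ((pvOutM grid m).getD r []).getD c 0 =
          if c < (grid.headD []).length ∧
              layB grid.length (grid.headD []).length r c < m
          then pvCellA grid
            (pvK grid - 1 - layB grid.length (grid.headD []).length r c,
             pvK grid - 1 - layB grid.length (grid.headD []).length r c)
          else pvCellA grid (r, c)) := by
  intro m
  induction m with
  | zero =>
    intro _
    rw [pvOutM_zero, List.map_id']
    refine ⟨rfl, fun _ => rfl, fun r c _ _ => ?_⟩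
    rw [if_neg (fun hcon => absurd hcon.2 (Nat.not_lt_zero _))]
    rfl
  | succ m ih =>
    intro hm
    obtain ⟨ihl, ihrow, ihe⟩ := ih (by omega)
    rw [pvOutM_succ grid m (by omega)]
    have hin : ∀ p ∈ pvFrame grid.length (grid.headD []).length m,
        p.1 < (pvOutM grid m).length ∧ p.2 < ((pvOutM grid m).getD p.1 []).length := by
      intro p hp
      obtain ⟨hp1, hp2, _⟩ := mem_pvFrame.1 hp
      refine ⟨by rw [ihl]; exact hp1, ?_⟩
      rw [ihrow]
      have hrow : grid.getD p.1 [] ∈ grid := by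
        rw [List.getD_eq_getElem _ _ hp1]
        exact List.getElem_mem _
      have := hpre _ hrow
      omega
    refine ⟨?_, ?_, ?_⟩
    · rw [assign_length, ihl]
    · intro r; rw [assign_row_length, ihrow]
    · intro r c hr hc
      rw [assign_entry _ _ _ r c hin]
      by_cases hf : (r, c) ∈ pvFrame grid.length (grid.headD []).length m
      · rw [if_pos hf]
        obtain ⟨hfr, hcw, hlay⟩ := mem_pvFrame.1 hf
        have hcw' : c < (grid.headD []).length := hcw
        have hlay' : layB grid.length (grid.headD []).length r c = m := hlay
        rw [if_pos ⟨hcw', by omega⟩, hlay']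
      · rw [if_neg hf, ihe r c hr hc]
        split_ifs with h1 h2 h2
        · rfl
        · omega
        · exfalso
          apply hf
          refine mem_pvFrame.2 ⟨hr, h2.1, ?_⟩
          show layB grid.length (grid.headD []).length r c = m
          omega
        · rfl

lemma pvL_le_mul (h w : Nat) (hh : h ≠ 0) (hw : w ≠ 0) : pvL h w ≤ h * w := by
  have h1 : pvL h w ≤ h := by simp only [pvL]; omega
  have h2 : h ≤ h * w := Nat.le_mul_of_pos_right h (by omega)
  omega

lemma rows_ext {l1 l2 : List (List Int)} (hlen : l1.length = l2.length)
    (h : ∀ r, r < l1.length → l1.getD r [] = l2.getD r []) : l1 = l2 := by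
  apply List.ext_getElem hlen
  intro i h1 h2
  rw [← List.getD_eq_getElem l1 [] h1, ← List.getD_eq_getElem l2 [] h2]
  exact h i h1

lemma entries_ext {l1 l2 : List Int} (hlen : l1.length = l2.length)
    (h : ∀ c, c < l1.length → l1.getD c 0 = l2.getD c 0) : l1 = l2 := by
  apply List.ext_getElem hlen
  intro i h1 h2
  rw [← List.getD_eq_getElem l1 0 h1, ← List.getD_eq_getElem l2 0 h2]
  exact h i h1

lemma getD_append_left' {l1 l2 : List Int} {i : Nat} (h : i < l1.length) :
    (l1 ++ l2).getD i 0 = l1.getD i 0 := by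
  rw [List.getD_eq_getElem _ _ (by rw [List.length_append]; omega),
    List.getElem_append_left h, List.getD_eq_getElem _ _ h]

lemma getD_append_right' {l1 l2 : List Int} {i : Nat} (h : l1.length ≤ i) :
    (l1 ++ l2).getD i 0 = l2.getD (i - l1.length) 0 := by
  rw [List.getD_eq_getElem?_getD, List.getD_eq_getElem?_getD, List.getElem?_append_right h]

lemma getD_drop_add (l : List Int) (i j : Nat) : (l.drop i).getD j 0 = l.getD (i + j) 0 := by
  rw [List.getD_eq_getElem?_getD, List.getD_eq_getElem?_getD, List.getElem?_drop]

lemma A_eq_model (grid : List (List Int)) (hh : grid.length ≠ 0)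
    (hw : (grid.headD []).length ≠ 0) (hpre : Pre_reverse_frame_colors grid) :
    reverse_frame_colors grid = pvModel grid := by
  have h0 : ¬ (grid.length = 0 ∨ (grid.headD []).length = 0) := by tauto
  simp only [reverse_frame_colors]
  rw [if_neg h0]
  have hrem0 : (List.range grid.length).flatMap
      (fun r => (List.range (grid.headD []).length).map (fun c => (r, c)))
      = pvRem grid.length (grid.headD []).length 0 := pvRem_zero.symm
  rw [hrem0]
  rw [loop_eq grid (pvL grid.length (grid.headD []).length) 0
    (grid.length * (grid.headD []).length) [] (by omega)
    (pvL_le_mul _ _ hh hw)]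
  rw [pvFm_eq_map grid (pvL grid.length (grid.headD []).length) 0 (by omega)
    (fun s hs => absurd hs (Nat.not_lt_zero s))]
  simp only [List.nil_append, Nat.zero_add, Nat.sub_zero, zero_add]
  by_cases hK0 : pvK grid = 0
  · rw [hK0]
    simp only [List.range_zero, List.map_nil, List.isEmpty_nil, if_true, List.map_id']
    simp only [pvModel, hK0, Nat.not_lt_zero, and_false, if_false]
    refine rows_ext ?_ ?_
    · rw [List.length_map, List.length_range]
    · intro r hr
      have hrowmem : grid.getD r [] ∈ grid := by
        rw [List.getD_eq_getElem _ _ hr]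
        exact List.getElem_mem _
      have hwle := hpre _ hrowmem
      rw [PySem.List.getD_map_range _ _ _ _ hr]
      exact (row_reconstruct (grid.getD r []) _ hwle).symm
  · have hne : ¬ (((List.range (pvK grid)).map
        (fun t => (pvFrame grid.length (grid.headD []).length t,
          pvCellA grid (t, t)))).isEmpty = true) := by
      rw [List.isEmpty_iff, List.map_eq_nil_iff, List.range_eq_nil]
      exact hK0
    rw [if_neg hne]
    have hcr : (((List.range (pvK grid)).map
        (fun t => (pvFrame grid.length (grid.headD []).length t,
          pvCellA grid (t, t)))).reverse).map (fun f => f.2)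
        = ((List.range (pvK grid)).map (fun t => pvCellA grid (t, t))).reverse := by
      rw [← List.map_reverse, List.map_map, ← List.map_reverse]
      exact List.map_congr_left (fun t _ => rfl)
    rw [hcr]
    have hfold : (PySem.List.enumerate ((List.range (pvK grid)).map
        (fun t => (pvFrame grid.length (grid.headD []).length t, pvCellA grid (t, t)))) 0).foldl
        (fun out fi => fi.2.1.foldl
          (pvAssign (PySem.List.pyGetD
            (((List.range (pvK grid)).map (fun t => pvCellA grid (t, t))).reverse) fi.1 0)) out)
        (grid.map (fun row => row)) = pvOutM grid (pvK grid) := rfl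
    rw [hfold]
    obtain ⟨hl, hrowl, hent⟩ := pvOutM_inv grid hpre (pvK grid) le_rfl
    refine rows_ext ?_ ?_
    · rw [hl]
      simp only [pvModel]
      rw [List.length_map, List.length_range]
    · intro r hr
      rw [hl] at hr
      have hrowmem : grid.getD r [] ∈ grid := by
        rw [List.getD_eq_getElem _ _ hr]
        exact List.getElem_mem _
      have hwle := hpre _ hrowmem
      simp only [pvModel]
      rw [PySem.List.getD_map_range _ _ _ _ hr]
      refine entries_ext ?_ ?_
      · rw [hrowl, List.length_append, List.length_map, List.length_range, List.length_drop]
        omega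
      · intro c hc
        rw [hrowl] at hc
        rw [hent r c hr hc]
        by_cases hcw : c < (grid.headD []).length
        · rw [getD_append_left' (by rw [List.length_map, List.length_range]; exact hcw)]
          rw [PySem.List.getD_map_range _ _ _ _ hcw]
          split_ifs with hx hy hy
          · rfl
          · exact absurd hx.2 hy
          · exact absurd ⟨hcw, hy⟩ hx
          · rfl
        · rw [getD_append_right' (by rw [List.length_map, List.length_range]; omega)]
          rw [List.length_map, List.length_range, getD_drop_add]
          rw [if_neg (fun hcon => hcw hcon.1)]
          rw [show (grid.headD []).length + (c - (grid.headD []).length) = c from by omega]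
          rfl

-- ---------- B equals the model ----------

lemma nested_foldl {β : Type} (g : β → Nat → Nat → β) (h w : Nat) (u0 : β) :
    (List.range h).foldl (fun u r => (List.range w).foldl (fun u c => g u r c) u) u0
      = (pvAll h w).foldl (fun u p => g u p.1 p.2) u0 := by
  rw [pvAll, List.flatMap_def, List.foldl_flatten, List.foldl_map]
  simp only [List.foldl_map]

lemma fold_flags_length (P : Nat × Nat → Prop) [DecidablePred P] (ix : Nat × Nat → Nat) :
    ∀ (xs : List (Nat × Nat)) (u : List Bool),
      (xs.foldl (fun u x => if P x then u.set (ix x) false else u) u).length = u.length := by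
  intro xs
  induction xs with
  | nil => intro u; rfl
  | cons x xs ih =>
    intro u
    simp only [List.foldl_cons]
    rw [ih]
    split_ifs <;> simp

lemma fold_flags_getD (P : Nat × Nat → Prop) [DecidablePred P] (ix : Nat × Nat → Nat) :
    ∀ (xs : List (Nat × Nat)) (u : List Bool) (i : Nat),
      (xs.foldl (fun u x => if P x then u.set (ix x) false else u) u).getD i false
        = (u.getD i false && !(xs.any (fun x => ix x == i && decide (P x)))) := by
  intro xs
  induction xs with
  | nil => intro u i; simp
  | cons x xs ih =>
    intro u i
    simp only [List.foldl_cons, List.any_cons]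
    by_cases hP : P x
    · rw [if_pos hP, ih, getD_set]
      split_ifs with hcase
      · simp [hcase.1, hP]
      · by_cases hix : ix x = i
        · rcases Nat.lt_or_ge (ix x) u.length with hlt | hge
          · exact absurd ⟨hix.symm, hlt⟩ hcase
          · rw [List.getD_eq_default _ _ (by omega)]
            simp
        · simp [show (ix x == i) = false from by simpa using hix]
    · rw [if_neg hP, ih]
      simp [hP]

lemma B_eq_model (grid : List (List Int)) (hh : grid.length ≠ 0)
    (hw : (grid.headD []).length ≠ 0) :
    reverse_frame_colors_alt grid = pvModel grid := by
  have h0 : ¬ (grid.length = 0 ∨ (grid.headD []).length = 0) := by tauto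
  simp only [reverse_frame_colors_alt]
  rw [if_neg h0]
  have hLdef : (min grid.length (grid.headD []).length + 1) / 2
      = pvL grid.length (grid.headD []).length := rfl
  rw [hLdef]
  have huni : (List.range grid.length).foldl (fun u r =>
      (List.range (grid.headD []).length).foldl (fun u c =>
        if (grid.getD r []).getD c 0 ≠
            ((List.range (pvL grid.length (grid.headD []).length)).map
              (fun l => (grid.getD l []).getD l 0)).getD
              (layB grid.length (grid.headD []).length r c) 0
        then u.set (layB grid.length (grid.headD []).length r c) false else u) u)
      (List.replicate (pvL grid.length (grid.headD []).length) true)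
      = (List.range (pvL grid.length (grid.headD []).length)).map (pvUb grid) := by
    rw [nested_foldl (fun (u : List Bool) (r c : Nat) =>
      if (grid.getD r []).getD c 0 ≠
          ((List.range (pvL grid.length (grid.headD []).length)).map
            (fun l => (grid.getD l []).getD l 0)).getD
            (layB grid.length (grid.headD []).length r c) 0
      then u.set (layB grid.length (grid.headD []).length r c) false else u)]
    rw [show (fun (u : List Bool) (p : Nat × Nat) =>
        if (grid.getD p.1 []).getD p.2 0 ≠
            ((List.range (pvL grid.length (grid.headD []).length)).map
              (fun l => (grid.getD l []).getD l 0)).getD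
              (layB grid.length (grid.headD []).length p.1 p.2) 0
        then u.set (layB grid.length (grid.headD []).length p.1 p.2) false else u)
      = (fun (u : List Bool) (p : Nat × Nat) =>
        if (fun q => (grid.getD q.1 []).getD q.2 0 ≠
            ((List.range (pvL grid.length (grid.headD []).length)).map
              (fun l => (grid.getD l []).getD l 0)).getD
              (layB grid.length (grid.headD []).length q.1 q.2) 0) p
        then u.set ((fun q => layB grid.length (grid.headD []).length q.1 q.2) p) false
        else u) from rfl]
    apply List.ext_getElem
    · rw [fold_flags_length, List.length_replicate, List.length_map, List.length_range]
    · intro l h1 h2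
      rw [fold_flags_length, List.length_replicate] at h1
      rw [← List.getD_eq_getElem _ false (by
        rw [fold_flags_length, List.length_replicate]; exact h1)]
      rw [List.getElem_map, List.getElem_range]
      rw [fold_flags_getD]
      rw [List.getD_replicate _ h1, Bool.true_and]
      have hCl : ((List.range (pvL grid.length (grid.headD []).length)).map
          (fun l => (grid.getD l []).getD l 0)).getD l 0
          = pvCellA grid (l, l) := PySem.List.getD_map_range _ _ _ _ h1
      rw [Bool.eq_iff_iff]
      constructor
      · intro hB
        rw [Bool.not_eq_eq_eq_not, Bool.not_true, List.any_eq_false] at hB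
        rw [pvUb, List.all_eq_true]
        intro p hp
        obtain ⟨hp1, hp2, hpl⟩ := mem_pvFrame.1 hp
        rw [beq_iff_eq]
        by_contra hne
        apply hB p (mem_pvAll.2 ⟨hp1, hp2⟩)
        rw [hpl]
        simp only [BEq.rfl, Bool.true_and, decide_eq_true_eq]
        rw [hCl]
        exact hne
      · intro hUb
        rw [Bool.not_eq_eq_eq_not, Bool.not_true, List.any_eq_false]
        intro p hp
        obtain ⟨hp1, hp2⟩ := mem_pvAll.1 hp
        simp only [Bool.and_eq_true, beq_iff_eq, decide_eq_true_eq, not_and]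
        intro hpl hne
        rw [pvUb, List.all_eq_true] at hUb
        have := hUb p (mem_pvFrame.2 ⟨hp1, hp2, hpl⟩)
        rw [beq_iff_eq] at this
        rw [hpl, hCl] at hne
        exact hne this
  rw [huni]
  have hk : pvPrefTrue ((List.range (pvL grid.length (grid.headD []).length)).map (pvUb grid))
      = pvK grid := rfl
  rw [hk]
  simp only [pvModel]
  apply List.map_congr_left
  intro r _
  congr 1
  apply List.map_congr_left
  intro c hc
  rw [List.mem_range] at hc
  split_ifs with hlt
  · have hKL := pvK_le_L grid
    have hidx : pvK grid - 1 - layB grid.length (grid.headD []).length r c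
        < pvL grid.length (grid.headD []).length := by omega
    rw [PySem.List.getD_map_range _ _ _ _ hidx]
    rfl
  · rfl

-- ===== VERDICT (by name: the statement is the Claim_ definition above) =====
theorem reverse_frame_colors_spec : Claim_equal_reverse_frame_colors := by
  intro grid _ hpre
  show reverse_frame_colors grid = reverse_frame_colors_alt grid
  by_cases hh : grid.length = 0
  · simp only [reverse_frame_colors, reverse_frame_colors_alt]
    rw [if_pos (Or.inl hh), if_pos (Or.inl hh)]
  · by_cases hw : (grid.headD []).length = 0
    · simp only [reverse_frame_colors, reverse_frame_colors_alt]
      rw [if_pos (Or.inr hw), if_pos (Or.inr hw)]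
    · rw [A_eq_model grid hh hw hpre, B_eq_model grid hh hw]
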